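-- pv_equiv track=rewrite | github.com/psclklnk/spdl | visualize_results.py | compute_indices
-- ===== SOURCE A (Python) =====
-- def compute_indices(n_objects, n_grids, spacing):
--     available_grids = n_grids - (n_objects - 1) * spacing
--     grids_per_object = int(available_grids / n_objects)
--     remainder = available_grids % n_objects
--
--     indices = []
--     count = 0
--     for i in range(0, n_objects):
--         end = count + grids_per_object
--         if remainder > 0:
--             end += 1
--             remainder -= 1
--         indices.append((count, end))
--         count = end + spacing
--
--     return indices
-- ===== SOURCE B (Python) =====
-- def compute_indices(n_objects, n_grids, spacing):
--     # Same three defining quantities as the original (verbatim), then each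
--     # (start, end) tuple is computed independently by closed-form index
--     # arithmetic instead of a sequential running-count loop.
--     available_grids = n_grids - (n_objects - 1) * spacing
--     grids_per_object = int(available_grids / n_objects)
--     remainder = available_grids % n_objects
--
--     base = grids_per_object + spacing
--     indices = []
--     for i in range(0, n_objects):
--         start = i * base + min(i, remainder)
--         indices.append((start, start + grids_per_object + (1 if i < remainder else 0)))
--     return indices
-- ===== Notes on version B (the rewrite author's own statement) =====
-- stated objective: alternative
-- what changed: The sequential loop threading a running count and a mutating remainder is replaced by an independent per-object closed-form computation: start = i*(grids_per_object+spacing) + min(i, remainder), end = start + grids_per_object + (1 if i < remainder else 0); the first three lines are kept verbatim so the numeric behaviour matches.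
import Mathlib
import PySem

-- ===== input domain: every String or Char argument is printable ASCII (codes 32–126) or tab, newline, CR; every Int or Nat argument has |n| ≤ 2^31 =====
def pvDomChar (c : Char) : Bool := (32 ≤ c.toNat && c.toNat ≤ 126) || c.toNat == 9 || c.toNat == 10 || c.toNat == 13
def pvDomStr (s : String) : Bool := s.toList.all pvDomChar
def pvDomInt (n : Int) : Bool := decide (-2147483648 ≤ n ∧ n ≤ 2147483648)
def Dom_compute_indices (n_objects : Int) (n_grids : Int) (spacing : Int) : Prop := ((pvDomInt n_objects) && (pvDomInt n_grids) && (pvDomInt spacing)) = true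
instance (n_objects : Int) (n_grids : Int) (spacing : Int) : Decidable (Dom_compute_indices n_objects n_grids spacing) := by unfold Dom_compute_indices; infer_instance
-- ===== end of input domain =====

-- B replaces A's sequential running-count loop by an independent closed-form
-- computation of each (start, end) tuple; same per-call cost (alternative decomposition).


-- ===== PORT A =====
-- int(available_grids / n_objects) is float true division then truncation toward 0;
-- it is ported as exact truncating integer division Int.tdiv, which coincides with the
-- Python value whenever |available_grids| < 2^52 (guaranteed by Pre_compute_indices).
def compute_indices (n_objects : Int) (n_grids : Int) (spacing : Int) : List (Int × Int) :=
  let available_grids := n_grids - (n_objects - 1) * spacing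
  let grids_per_object := available_grids.tdiv n_objects
  let remainder := PySem.Int.mod available_grids n_objects
  let st := (PySem.List.pyRange 0 n_objects 1).foldl
    (fun (st : List (Int × Int) × Int × Int) _ =>
      let indices := st.1
      let count := st.2.1
      let remainder := st.2.2
      let e := count + grids_per_object
      let er := if remainder > 0 then (e + 1, remainder - 1) else (e, remainder)
      (indices ++ [(count, er.1)], er.1 + spacing, er.2))
    ([], 0, remainder)
  st.1

-- ===== PORT B =====
def compute_indices_alt (n_objects : Int) (n_grids : Int) (spacing : Int) : List (Int × Int) :=
  let available_grids := n_grids - (n_objects - 1) * spacing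
  let grids_per_object := available_grids.tdiv n_objects
  let remainder := PySem.Int.mod available_grids n_objects
  let base := grids_per_object + spacing
  (PySem.List.pyRange 0 n_objects 1).map (fun i =>
    let start := i * base + min i remainder
    (start, start + grids_per_object + (if i < remainder then 1 else 0)))

-- ===== PRECONDITION & SPEC =====
-- n_objects ≠ 0: Python A raises ZeroDivisionError at n_objects = 0.
-- The |available_grids| < 2^52 bound excludes inputs (they need n_objects ≥ 2^21, so
-- multi-million-element outputs) on which A still returns but its value depends on IEEE
-- double rounding inside int(available_grids / n_objects); Python B keeps those three
-- lines verbatim and returns the identical value there, but the Lean ports use exact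
-- truncating division, which can differ from the float result beyond that bound.
def Pre_compute_indices (n_objects : Int) (n_grids : Int) (spacing : Int) : Prop :=
  n_objects ≠ 0 ∧
  -(4503599627370496 : Int) < n_grids - (n_objects - 1) * spacing ∧
  n_grids - (n_objects - 1) * spacing < (4503599627370496 : Int)
instance (n_objects : Int) (n_grids : Int) (spacing : Int) : Decidable (Pre_compute_indices n_objects n_grids spacing) := by unfold Pre_compute_indices; infer_instance
def pvWitness_compute_indices : Int × Int × Int := (3, 10, 1)

def Spec_compute_indices (n_objects : Int) (n_grids : Int) (spacing : Int) (out : List (Int × Int)) : Prop := out = compute_indices_alt n_objects n_grids spacing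
instance (n_objects : Int) (n_grids : Int) (spacing : Int) (out : List (Int × Int)) : Decidable (Spec_compute_indices n_objects n_grids spacing out) := by unfold Spec_compute_indices; infer_instance

-- ===== CLAIM (what is proved, stated in full; the proofs are below) =====
def Claim_equal_compute_indices : Prop := ∀ (n_objects : Int) (n_grids : Int) (spacing : Int), Dom_compute_indices n_objects n_grids spacing → Pre_compute_indices n_objects n_grids spacing → Spec_compute_indices n_objects n_grids spacing (compute_indices n_objects n_grids spacing)

-- ===== LEMMAS AND PROOFS =====

-- Invariant of A's loop after m iterations: the accumulated list is B's closed form on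
-- the first m indices, count = m*(g+s) + min m r, remainder = r - min m r (needs 0 ≤ r).
lemma compute_indices_loop_inv (g s r : Int) (hr : 0 ≤ r) (m : Nat) :
    (List.range m).foldl
      (fun (st : List (Int × Int) × Int × Int) (_ : Nat) =>
        let indices := st.1
        let count := st.2.1
        let remainder := st.2.2
        let e := count + g
        let er := if remainder > 0 then (e + 1, remainder - 1) else (e, remainder)
        (indices ++ [(count, er.1)], er.1 + s, er.2))
      ([], 0, r)
    = ((List.range m).map (fun (k : Nat) =>
         ((k : Int) * (g + s) + min (k : Int) r,
          (k : Int) * (g + s) + min (k : Int) r + g + (if (k : Int) < r then 1 else 0))),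
       (m : Int) * (g + s) + min (m : Int) r,
       r - min (m : Int) r) := by
  induction m with
  | zero => simp; omega
  | succ m ih =>
      rw [List.range_succ, List.foldl_append, ih]
      simp only [List.foldl_cons, List.foldl_nil, List.map_append, List.map_cons, List.map_nil]
      by_cases h : (m : Int) < r
      · rw [if_pos (show r - min (m : Int) r > 0 by omega)]
        push_cast
        rw [min_eq_left (by omega : (m : Int) ≤ r),
            min_eq_left (by omega : (m : Int) + 1 ≤ r), if_pos h]
        exact congrArg₂ Prod.mk rfl (congrArg₂ Prod.mk (by ring) (by ring))
      · rw [if_neg (show ¬ (r - min (m : Int) r > 0) by omega)]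
        push_cast
        rw [min_eq_right (by omega : r ≤ (m : Int)),
            min_eq_right (by omega : r ≤ (m : Int) + 1), if_neg h]
        simp only [add_zero]
        exact congrArg₂ Prod.mk rfl (congrArg₂ Prod.mk (by ring) (by ring))

-- ===== VERDICT (by name: the statement is the Claim_ definition above) =====
theorem compute_indices_spec : Claim_equal_compute_indices := by
  intro n g s _ hpre
  obtain ⟨hn, _, _⟩ := hpre
  unfold Spec_compute_indices compute_indices compute_indices_alt
  by_cases hnp : n ≤ 0
  · rw [PySem.List.pyRange_one_eq_nil hnp]
    simp
  · have hpos : 0 < n := by omega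
    have hr : 0 ≤ PySem.Int.mod (g - (n - 1) * s) n := by
      rw [PySem.Int.mod_eq_emod_of_pos hpos]
      exact Int.emod_nonneg _ (by omega)
    rw [PySem.List.pyRange_one 0 n]
    simp only [zero_add, sub_zero, List.foldl_map, List.map_map]
    rw [compute_indices_loop_inv ((g - (n - 1) * s).tdiv n) s _ hr n.toNat]
    simp [Function.comp]
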